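-- pv_equiv track=rewrite | github.com/keiver31/Fundamentos_Python | Modulo_5/Ejercicio_2.py | orden
-- ===== SOURCE A (Python) =====
-- def orden(palabra):
--
--     lista_palabras=[]
--
--     resultados=list(palabra)
--
--
--     for resultados in resultados:
--         if resultados not in lista_palabras:
--             lista_palabras.append(resultados)
--
--     lista_palabras.sort()
--
--     return lista_palabras
-- ===== SOURCE B (Python) =====
-- def orden(palabra):
--     resultado = []
--     prev = None
--     for c in sorted(palabra):
--         if c != prev:
--             resultado.append(c)
--             prev = c
--     return resultado
-- ===== Notes on version B (the rewrite author's own statement) =====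
-- stated objective: alternative
-- what changed: B sorts all characters first and then removes adjacent duplicates in a single linear pass tracking the previously kept character, replacing A's membership-test dedup loop followed by a sort.
import Mathlib
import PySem

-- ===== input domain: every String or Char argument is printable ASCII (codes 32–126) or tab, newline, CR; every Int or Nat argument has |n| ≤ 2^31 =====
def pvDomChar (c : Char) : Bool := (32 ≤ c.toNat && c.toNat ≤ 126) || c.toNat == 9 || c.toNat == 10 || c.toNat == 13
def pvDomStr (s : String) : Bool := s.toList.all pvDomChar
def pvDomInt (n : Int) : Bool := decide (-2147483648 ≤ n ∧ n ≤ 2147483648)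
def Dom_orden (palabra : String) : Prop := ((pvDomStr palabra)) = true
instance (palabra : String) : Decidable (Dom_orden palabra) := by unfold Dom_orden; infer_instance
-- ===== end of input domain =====

-- B sorts the characters first and removes adjacent duplicates in one linear pass,
-- instead of A's membership-test dedup loop followed by a sort (objective: alternative).

-- ===== PORT A =====
-- list(palabra): Python's one-character strings
def pvChars (palabra : String) : List String :=
  palabra.toList.map (fun c => String.ofList [c])

def orden (palabra : String) : List String :=
  let lista_palabras : List String :=
    (pvChars palabra).foldl
      (fun lista_palabras r => if r ∈ lista_palabras then lista_palabras else lista_palabras ++ [r]) []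
  PySem.List.sorted lista_palabras (fun x => x) false

-- ===== PORT B =====
-- the for-loop over sorted(palabra): state (resultado, prev); 'c != prev' with prev : Option initially none
def orden_alt (palabra : String) : List String :=
  ((PySem.List.sorted (pvChars palabra) (fun x => x) false).foldl
    (fun st c => if some c ≠ st.2 then (st.1 ++ [c], some c) else st) ([], none)).1

-- ===== PRECONDITION & SPEC =====
def Spec_orden (palabra : String) (out : List String) : Prop := out = orden_alt palabra
instance (palabra : String) (out : List String) : Decidable (Spec_orden palabra out) := by unfold Spec_orden; infer_instance

-- ===== CLAIM (what is proved, stated in full; the proofs are below) =====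
def Claim_equal_orden : Prop := ∀ (palabra : String), Dom_orden palabra → Spec_orden palabra (orden palabra)

-- ===== LEMMAS AND PROOFS =====

-- closed form of B's loop body after the first element: adjacent-duplicate removal with 'prev' = p
def adjF (p : String) : List String → List String
  | [] => []
  | c :: t => if c = p then adjF p t else c :: adjF c t

def adjTop : List String → List String
  | [] => []
  | c :: t => c :: adjF c t

theorem foldB_some (l : List String) (acc : List String) (p : String) :
    (l.foldl (fun st c => if some c ≠ st.2 then (st.1 ++ [c], some c) else st) (acc, some p)).1
      = acc ++ adjF p l := by
  induction l generalizing acc p with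
  | nil => simp [adjF]
  | cons c t ih =>
    simp only [List.foldl_cons]
    by_cases h : c = p
    · subst h
      rw [if_neg (by simp)]
      rw [ih]
      simp [adjF]
    · rw [if_pos (by simp [h])]
      rw [ih]
      simp [adjF, h]

theorem foldB_eq_adjTop (l : List String) :
    (l.foldl (fun st c => if some c ≠ st.2 then (st.1 ++ [c], some c) else st) ([], none)).1
      = adjTop l := by
  cases l with
  | nil => simp [adjTop]
  | cons c t =>
    simp only [List.foldl_cons]
    rw [if_pos (by simp)]
    rw [foldB_some]
    simp [adjTop]

theorem mem_foldA (l : List String) (acc : List String) (x : String) :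
    x ∈ l.foldl (fun a r => if r ∈ a then a else a ++ [r]) acc ↔ x ∈ acc ∨ x ∈ l := by
  induction l generalizing acc with
  | nil => simp
  | cons c t ih =>
    simp only [List.foldl_cons]
    by_cases h : c ∈ acc
    · rw [if_pos h, ih]
      simp only [List.mem_cons]
      constructor
      · rintro (hx | hx)
        exacts [Or.inl hx, Or.inr (Or.inr hx)]
      · rintro (hx | hx | hx)
        exacts [Or.inl hx, Or.inl (hx ▸ h), Or.inr hx]
    · rw [if_neg h, ih]
      simp only [List.mem_append, List.mem_cons]
      tauto

theorem nodup_foldA (l : List String) (acc : List String) (h : acc.Nodup) :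
    (l.foldl (fun a r => if r ∈ a then a else a ++ [r]) acc).Nodup := by
  induction l generalizing acc with
  | nil => simpa
  | cons c t ih =>
    simp only [List.foldl_cons]
    by_cases hc : c ∈ acc
    · rw [if_pos hc]
      exact ih acc h
    · rw [if_neg hc]
      refine ih (acc ++ [c]) ?_
      refine List.Nodup.append h (List.nodup_singleton c) ?_
      simp only [List.disjoint_singleton]
      exact hc

theorem adjF_subset (l : List String) (p x : String) (hx : x ∈ adjF p l) : x ∈ l := by
  induction l generalizing p with
  | nil => simp [adjF] at hx
  | cons c t ih =>
    by_cases h : c = p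
    · simp only [adjF, if_pos h] at hx
      exact List.mem_cons_of_mem _ (ih p hx)
    · simp only [adjF, if_neg h] at hx
      rcases List.mem_cons.mp hx with hx | hx
      · exact hx ▸ List.mem_cons_self
      · exact List.mem_cons_of_mem _ (ih c hx)

theorem mem_cons_adjF (l : List String) (c : String)
    (hs : (c :: l).Pairwise (· ≤ ·)) (x : String) (hx : x ∈ c :: l) :
    x ∈ c :: adjF c l := by
  induction l generalizing c with
  | nil => simp [adjF] at hx ⊢; exact hx
  | cons b t ih =>
    rcases List.mem_cons.mp hx with hx | hx
    · exact hx ▸ List.mem_cons_self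
    · have hs' : (b :: t).Pairwise (· ≤ ·) := (List.pairwise_cons.mp hs).2
      have hmem : x ∈ b :: adjF b t := ih b hs' hx
      by_cases h : b = c
      · subst h
        simpa [adjF] using hmem
      · simp only [adjF, if_neg h]
        exact List.mem_cons_of_mem _ hmem

theorem pairwise_adjF (l : List String) (c : String)
    (hs : (c :: l).Pairwise (· ≤ ·)) :
    (c :: adjF c l).Pairwise (· < ·) := by
  induction l generalizing c with
  | nil => simp [adjF]
  | cons b t ih =>
    obtain ⟨hc, hs'⟩ := List.pairwise_cons.mp hs
    by_cases h : b = c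
    · subst h
      simpa [adjF] using ih b hs'
    · have hcb : c < b := lt_of_le_of_ne (hc b List.mem_cons_self) (fun e => h e.symm)
      have hrec : (b :: adjF b t).Pairwise (· < ·) := ih b hs'
      have hble : ∀ y ∈ t, b ≤ y := (List.pairwise_cons.mp hs').1
      simp only [adjF, if_neg h]
      refine List.pairwise_cons.mpr ⟨?_, hrec⟩
      intro y hy
      rcases List.mem_cons.mp hy with hy | hy
      · exact hy ▸ hcb
      · exact lt_of_lt_of_le hcb (hble y (adjF_subset t b y hy))
theorem mem_adjTop (l : List String) (hs : l.Pairwise (· ≤ ·)) (x : String) :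
    x ∈ adjTop l ↔ x ∈ l := by
  cases l with
  | nil => simp [adjTop]
  | cons c t =>
    constructor
    · intro hx
      rcases List.mem_cons.mp hx with hx | hx
      · exact hx ▸ List.mem_cons_self
      · exact List.mem_cons_of_mem _ (adjF_subset t c x hx)
    · exact mem_cons_adjF t c hs x

theorem pairwise_adjTop (l : List String) (hs : l.Pairwise (· ≤ ·)) :
    (adjTop l).Pairwise (· < ·) := by
  cases l with
  | nil => simp [adjTop]
  | cons c t => exact pairwise_adjF t c hs

-- ===== VERDICT (by name: the statement is the Claim_ definition above) =====
theorem orden_spec : Claim_equal_orden := by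
  intro palabra _
  unfold Spec_orden orden orden_alt
  set cs := pvChars palabra with hcs
  rw [foldB_eq_adjTop]
  set s := PySem.List.sorted cs (fun x => x) false with hsdef
  have hsp : s.Pairwise (· ≤ ·) := PySem.List.sorted_pairwise cs (fun x => x)
  have hpw : (adjTop s).Pairwise (· < ·) := pairwise_adjTop s hsp
  apply PySem.List.sorted_eq_of_perm_of_pairwise_lt
  · -- Perm
    refine (List.perm_ext_iff_of_nodup ?_ ?_).mpr ?_
    · exact (hpw.imp ne_of_lt)
    · exact nodup_foldA cs [] List.nodup_nil
    · intro a
      rw [mem_adjTop s hsp, hsdef, PySem.List.mem_sorted, mem_foldA]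
      simp
  · exact hpw
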